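-- pv_equiv track=rewrite | github.com/jana369/Graduation-Project | NSGA-II Model (12 Devices).py | remove_duplicates_across_pareto_fronts
-- ===== SOURCE A (Python) =====
-- def remove_duplicates_across_pareto_fronts(all_pareto_fronts):
--     """Remove duplicate solutions from each Pareto front by comparing across all other Pareto fronts."""
--     if not all_pareto_fronts:
--         return []
--
--     all_solutions = [ind for pf in all_pareto_fronts for ind in pf]
--     all_solution_tuples = {tuple(ind): ind for ind in all_solutions}
--
--     unique_pareto_fronts = []
--     for i, pf in enumerate(all_pareto_fronts):
--         unique_pf = []
--         seen_in_other_fronts = set()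
--         for j, other_pf in enumerate(all_pareto_fronts):
--             if i != j:
--                 seen_in_other_fronts.update(tuple(ind) for ind in other_pf)
--
--         for ind in pf:
--             ind_tuple = tuple(ind)
--             if ind_tuple not in seen_in_other_fronts:
--                 unique_pf.append(ind)
--
--         if unique_pf:
--             unique_pareto_fronts.append(unique_pf)
--
--     return unique_pareto_fronts
-- ===== SOURCE B (Python) =====
-- def remove_duplicates_across_pareto_fronts(all_pareto_fronts):
--     """Remove duplicate solutions from each Pareto front by comparing across all other Pareto fronts."""
--     # One pass: collect the tuples that occur in more than one front (counting each
--     # front at most once), then keep only solutions whose tuple is not shared.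
--     seen = set()
--     shared = set()
--     for pf in all_pareto_fronts:
--         for t in {tuple(ind) for ind in pf}:
--             if t in seen:
--                 shared.add(t)
--             else:
--                 seen.add(t)
--     result = []
--     for pf in all_pareto_fronts:
--         unique_pf = [ind for ind in pf if tuple(ind) not in shared]
--         if unique_pf:
--             result.append(unique_pf)
--     return result
-- ===== Notes on version B (the rewrite author's own statement) =====
-- stated objective: faster
-- what changed: Instead of rebuilding, for every front i, a set of all solutions of all other fronts (an O(F*N) scan per front), B makes one pass over all fronts collecting the set of solution tuples that occur in more than one front, then filters each front against that single set.
import Mathlib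
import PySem

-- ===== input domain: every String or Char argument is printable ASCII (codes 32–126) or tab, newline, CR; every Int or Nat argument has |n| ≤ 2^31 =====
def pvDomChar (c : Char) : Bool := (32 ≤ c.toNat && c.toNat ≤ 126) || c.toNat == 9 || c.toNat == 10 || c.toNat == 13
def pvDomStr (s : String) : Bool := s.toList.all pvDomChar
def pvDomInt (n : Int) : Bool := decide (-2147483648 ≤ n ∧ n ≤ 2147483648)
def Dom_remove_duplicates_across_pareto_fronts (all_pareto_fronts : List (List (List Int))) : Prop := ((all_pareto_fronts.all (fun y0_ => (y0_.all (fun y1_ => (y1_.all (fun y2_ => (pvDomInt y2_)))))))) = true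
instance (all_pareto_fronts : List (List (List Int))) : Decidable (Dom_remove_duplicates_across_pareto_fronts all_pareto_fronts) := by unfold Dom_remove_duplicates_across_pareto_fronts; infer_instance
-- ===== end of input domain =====

-- B replaces A's per-front rebuild of the set of all other fronts' solutions by ONE pass
-- collecting the set of solution tuples occurring in more than one front; objective: faster.

-- ===== PORT A =====
-- Literal port of A. `all_solutions`/`all_solution_tuples` are computed and never read
-- in A; they are kept here as bound values for faithfulness.
def remove_duplicates_across_pareto_fronts (all_pareto_fronts : List (List (List Int))) : List (List (List Int)) :=
  if all_pareto_fronts = [] then []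
  else
    let _all_solutions : List (List Int) := all_pareto_fronts.flatMap (fun pf => pf)
    let _all_solution_tuples : PySem.Dict (List Int) (List Int) :=
      _all_solutions.foldl (fun d ind => d.insert ind ind) PySem.Dict.empty
    (PySem.List.enumerate all_pareto_fronts).foldl
      (fun (acc : List (List (List Int))) (ip : Int × List (List Int)) =>
        let seen_in_other_fronts : PySem.Set (List Int) :=
          (PySem.List.enumerate all_pareto_fronts).foldl
            (fun s jp => if ip.1 ≠ jp.1 then PySem.Set.update s jp.2 else s)
            PySem.Set.empty
        let unique_pf : List (List Int) :=
          ip.2.foldl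
            (fun u ind => if !PySem.Set.contains seen_in_other_fronts ind then u ++ [ind] else u)
            []
        if unique_pf ≠ [] then acc ++ [unique_pf] else acc)
      []

-- ===== PORT B =====
def remove_duplicates_across_pareto_fronts_alt (all_pareto_fronts : List (List (List Int))) : List (List (List Int)) :=
  -- one pass: (seen, shared); shared = tuples occurring in more than one front
  let sd : PySem.Set (List Int) × PySem.Set (List Int) :=
    all_pareto_fronts.foldl
      (fun p pf =>
        (PySem.Set.ofList pf).foldl
          (fun q t =>
            if PySem.Set.contains q.1 t then (q.1, PySem.Set.add q.2 t)
            else (PySem.Set.add q.1 t, q.2))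
          p)
      (PySem.Set.empty, PySem.Set.empty)
  all_pareto_fronts.foldl
    (fun acc pf =>
      let unique_pf := pf.filter (fun ind => !PySem.Set.contains sd.2 ind)
      if unique_pf ≠ [] then acc ++ [unique_pf] else acc)
    []

-- ===== PRECONDITION & SPEC =====
def Spec_remove_duplicates_across_pareto_fronts (all_pareto_fronts : List (List (List Int))) (out : List (List (List Int))) : Prop := out = remove_duplicates_across_pareto_fronts_alt all_pareto_fronts
instance (all_pareto_fronts : List (List (List Int))) (out : List (List (List Int))) : Decidable (Spec_remove_duplicates_across_pareto_fronts all_pareto_fronts out) := by unfold Spec_remove_duplicates_across_pareto_fronts; infer_instance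

-- ===== CLAIM (what is proved, stated in full; the proofs are below) =====
def Claim_equal_remove_duplicates_across_pareto_fronts : Prop := ∀ (all_pareto_fronts : List (List (List Int))), Dom_remove_duplicates_across_pareto_fronts all_pareto_fronts → Spec_remove_duplicates_across_pareto_fronts all_pareto_fronts (remove_duplicates_across_pareto_fronts all_pareto_fronts)

-- ===== LEMMAS AND PROOFS =====

-- B's inner fold over the deduplicated tuples of one front: membership in the two sets.
theorem pv_inner_mem (s : List (List Int)) (hs : s.Nodup)
    (p : PySem.Set (List Int) × PySem.Set (List Int)) (t : List Int) :
    (t ∈ (s.foldl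
        (fun q t =>
          if PySem.Set.contains q.1 t then (q.1, PySem.Set.add q.2 t)
          else (PySem.Set.add q.1 t, q.2)) p).1 ↔ t ∈ p.1 ∨ t ∈ s)
    ∧ (t ∈ (s.foldl
        (fun q t =>
          if PySem.Set.contains q.1 t then (q.1, PySem.Set.add q.2 t)
          else (PySem.Set.add q.1 t, q.2)) p).2 ↔ t ∈ p.2 ∨ (t ∈ s ∧ t ∈ p.1)) := by
  induction s generalizing p with
  | nil => simp
  | cons x s ih =>
    obtain ⟨hx, hnd⟩ := List.nodup_cons.mp hs
    simp only [List.foldl_cons]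
    by_cases hmem : x ∈ p.1
    · have hc : PySem.Set.contains p.1 x = true := (PySem.Set.contains_iff _ _).mpr hmem
      rw [if_pos hc]
      have h := ih hnd (p.1, PySem.Set.add p.2 x)
      dsimp only at h
      refine ⟨?_, ?_⟩
      · rw [h.1]
        simp only [List.mem_cons]
        constructor
        · rintro (h1 | h1) <;> tauto
        · rintro (h1 | rfl | h1)
          · tauto
          · exact Or.inl hmem
          · tauto
      · rw [h.2]
        simp only [PySem.Set.mem_add, List.mem_cons]
        constructor
        · rintro ((h1 | rfl) | ⟨h1, h2⟩)
          · tauto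
          · exact Or.inr ⟨Or.inl rfl, hmem⟩
          · tauto
        · rintro (h1 | ⟨rfl | h1, h2⟩)
          · tauto
          · exact Or.inl (Or.inr rfl)
          · tauto
    · rw [if_neg (fun hcc => hmem ((PySem.Set.contains_iff p.1 x).mp hcc))]
      have h := ih hnd (PySem.Set.add p.1 x, p.2)
      dsimp only at h
      refine ⟨?_, ?_⟩
      · rw [h.1]
        simp only [PySem.Set.mem_add, List.mem_cons]
        tauto
      · rw [h.2]
        simp only [PySem.Set.mem_add, List.mem_cons]
        constructor
        · rintro (h1 | ⟨h1, h2 | rfl⟩)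
          · tauto
          · exact Or.inr ⟨Or.inr h1, h2⟩
          · exact absurd h1 hx
        · rintro (h1 | ⟨rfl | h1, h2⟩)
          · tauto
          · exact absurd h2 hmem
          · exact Or.inr ⟨h1, Or.inl h2⟩

-- B's outer fold: membership in the two accumulated sets, counted over the fronts.
set_option maxHeartbeats 1000000 in
theorem pv_sets_mem (fronts : List (List (List Int)))
    (p : PySem.Set (List Int) × PySem.Set (List Int)) (t : List Int) :
    (t ∈ (fronts.foldl
        (fun p pf =>
          (PySem.Set.ofList pf).foldl
            (fun q t =>
              if PySem.Set.contains q.1 t then (q.1, PySem.Set.add q.2 t)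
              else (PySem.Set.add q.1 t, q.2)) p) p).1
        ↔ t ∈ p.1 ∨ 0 < fronts.countP (fun pf => decide (t ∈ pf)))
    ∧ (t ∈ (fronts.foldl
        (fun p pf =>
          (PySem.Set.ofList pf).foldl
            (fun q t =>
              if PySem.Set.contains q.1 t then (q.1, PySem.Set.add q.2 t)
              else (PySem.Set.add q.1 t, q.2)) p) p).2
        ↔ t ∈ p.2 ∨ (t ∈ p.1 ∧ 0 < fronts.countP (fun pf => decide (t ∈ pf)))
            ∨ 2 ≤ fronts.countP (fun pf => decide (t ∈ pf))) := by
  induction fronts generalizing p with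
  | nil => simp
  | cons pf rest ih =>
    simp only [List.foldl_cons, List.countP_cons]
    have hin := pv_inner_mem (PySem.Set.ofList pf) (PySem.Set.nodup_ofList pf) p t
    rw [PySem.Set.mem_ofList] at hin
    have hih := ih ((PySem.Set.ofList pf).foldl
      (fun q t =>
        if PySem.Set.contains q.1 t then (q.1, PySem.Set.add q.2 t)
        else (PySem.Set.add q.1 t, q.2)) p)
    set c := rest.countP (fun pf => decide (t ∈ pf)) with hc
    by_cases hpf : t ∈ pf
    · simp only [hpf, decide_true, if_true]
      have e1 : 0 < c + 1 := by omega
      have e2 : (2 ≤ c + 1) ↔ 0 < c := by omega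
      rw [e2]
      refine ⟨?_, ?_⟩
      · rw [hih.1, hin.1]
        constructor
        · intro _; exact Or.inr e1
        · intro _; exact Or.inl (Or.inr hpf)
      · rw [hih.2, hin.2, hin.1]
        constructor
        · rintro ((h1 | ⟨_, h2⟩) | ⟨_, h3⟩ | h4)
          · exact Or.inl h1
          · exact Or.inr (Or.inl ⟨h2, e1⟩)
          · exact Or.inr (Or.inr h3)
          · exact Or.inr (Or.inr (by omega))
        · rintro (h1 | ⟨h2, _⟩ | h3)
          · exact Or.inl (Or.inl h1)
          · exact Or.inl (Or.inr ⟨hpf, h2⟩)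
          · exact Or.inr (Or.inl ⟨Or.inr hpf, h3⟩)
    · simp only [hpf, decide_false, Bool.false_eq_true, if_false, Nat.add_zero]
      refine ⟨?_, ?_⟩
      · rw [hih.1, hin.1]
        tauto
      · rw [hih.2, hin.2, hin.1]
        tauto

-- A's per-front set: membership after folding "update unless same index".
theorem pv_seen_mem (i : Int) (t : List Int) (L : List (Int × List (List Int))) :
    ∀ (s0 : PySem.Set (List Int)),
      (t ∈ L.foldl (fun s jp => if i ≠ jp.1 then PySem.Set.update s jp.2 else s) s0
        ↔ t ∈ s0 ∨ ∃ jp ∈ L, i ≠ jp.1 ∧ t ∈ jp.2) := by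
  induction L with
  | nil => simp
  | cons jp L ih =>
    intro s0
    simp only [List.foldl_cons, List.mem_cons]
    by_cases hij : i ≠ jp.1
    · rw [if_pos hij, ih, PySem.Set.mem_update]
      constructor
      · rintro ((h | h) | ⟨q, hq, hne, hm⟩)
        · tauto
        · exact Or.inr ⟨jp, Or.inl rfl, hij, h⟩
        · exact Or.inr ⟨q, Or.inr hq, hne, hm⟩
      · rintro (h | ⟨q, (rfl | hq), hne, hm⟩) <;> tauto
    · rw [if_neg hij, ih]
      constructor
      · rintro (h | ⟨q, hq, hne, hm⟩)
        · tauto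
        · exact Or.inr ⟨q, Or.inr hq, hne, hm⟩
      · rintro (h | ⟨q, (rfl | hq), hne, hm⟩)
        · tauto
        · exact absurd hne hij
        · exact Or.inr ⟨q, hq, hne, hm⟩

-- countP ≥ 2, given one witnessing index, means a second distinct index exists.
theorem pv_two_le_countP_iff {α : Type} (p : α → Bool) (l : List α) (k : Nat)
    (hk : k < l.length) (hpk : p (l[k]'hk) = true) :
    2 ≤ l.countP p ↔ ∃ m, ∃ hm : m < l.length, m ≠ k ∧ p (l[m]'hm) = true := by
  induction l generalizing k with
  | nil => exact absurd hk (by simp)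
  | cons x l ih =>
    rw [List.countP_cons]
    cases k with
    | zero =>
      have hpx : p x = true := hpk
      rw [if_pos hpx]
      have e : (2 ≤ l.countP p + 1) ↔ 0 < l.countP p := by omega
      rw [e, List.countP_pos_iff]
      constructor
      · rintro ⟨a, ha, hpa⟩
        obtain ⟨j, hj, rfl⟩ := List.mem_iff_getElem.mp ha
        refine ⟨j + 1, by simpa using hj, by omega, ?_⟩
        simpa using hpa
      · rintro ⟨m, hm, hne, hpm⟩
        cases m with
        | zero => omega
        | succ j =>
          have hj : j < l.length := by simpa using hm
          exact ⟨l[j]'hj, List.getElem_mem hj, by simpa using hpm⟩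
    | succ j =>
      have hj : j < l.length := by simpa using hk
      have hpj : p (l[j]'hj) = true := by simpa using hpk
      have hpos : 0 < l.countP p := List.countP_pos_iff.mpr ⟨l[j]'hj, List.getElem_mem hj, hpj⟩
      by_cases hpx : p x = true
      · rw [if_pos hpx]
        constructor
        · intro _
          exact ⟨0, by simp, by omega, hpx⟩
        · intro _; omega
      · rw [if_neg hpx, Nat.add_zero, ih j hj hpj]
        constructor
        · rintro ⟨m, hm, hne, hpm⟩
          refine ⟨m + 1, by simpa using hm, by omega, ?_⟩
          simpa using hpm
        · rintro ⟨m, hm, hne, hpm⟩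
          cases m with
          | zero => exact absurd hpm hpx
          | succ m' =>
            have hm' : m' < l.length := by simpa using hm
            refine ⟨m', hm', by omega, ?_⟩
            simpa using hpm

-- folding over enumerate with an index-ignoring body is folding over the list
theorem pv_foldl_enumerate {α β : Type} (g : β → α → β) (l : List α) :
    ∀ (s : Int) (init : β),
      (PySem.List.enumerate l s).foldl (fun acc q => g acc q.2) init = l.foldl g init := by
  induction l with
  | nil => intro s init; simp [PySem.List.enumerate_nil]
  | cons x l ih =>
    intro s init
    rw [PySem.List.enumerate_cons]
    simp only [List.foldl_cons]
    exact ih _ _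

-- the pointwise bridge: a solution of front k is "seen in another front" (A) iff "shared" (B)
set_option maxHeartbeats 1000000 in
theorem pv_keep_iff (fronts : List (List (List Int))) (k : Nat) (hk : k < fronts.length)
    (ind : List Int) (hind : ind ∈ fronts[k]) :
    (ind ∈ (PySem.List.enumerate fronts).foldl
        (fun s jp => if (0 + (k : Int)) ≠ jp.1 then PySem.Set.update s jp.2 else s)
        PySem.Set.empty
      ↔ ind ∈ (fronts.foldl
        (fun p pf =>
          (PySem.Set.ofList pf).foldl
            (fun q t =>
              if PySem.Set.contains q.1 t then (q.1, PySem.Set.add q.2 t)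
              else (PySem.Set.add q.1 t, q.2)) p)
        (PySem.Set.empty, PySem.Set.empty)).2) := by
  rw [pv_seen_mem (0 + (k : Int)) ind (PySem.List.enumerate fronts) PySem.Set.empty,
    (pv_sets_mem fronts (PySem.Set.empty, PySem.Set.empty) ind).2]
  have hempty : ∀ u : List Int, u ∈ (PySem.Set.empty : PySem.Set (List Int)) ↔ False := by
    intro u; simp [PySem.Set.empty]
  rw [pv_two_le_countP_iff (fun pf => decide (ind ∈ pf)) fronts k hk (by simpa using hind)]
  simp only [hempty, false_or, false_and]
  constructor
  · rintro ⟨jp, hjp, hne, hm⟩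
    obtain ⟨m, hm', hjp2⟩ := (PySem.List.mem_enumerate_iff fronts 0 jp).mp hjp
    subst hjp2
    refine ⟨m, hm', ?_, by simpa using hm⟩
    intro h
    subst h
    exact hne rfl
  · rintro ⟨m, hm, hne, hpm⟩
    refine ⟨(0 + (m : Int), fronts[m]'hm),
      (PySem.List.mem_enumerate_iff fronts 0 (0 + (m : Int), fronts[m]'hm)).mpr ⟨m, hm, rfl⟩,
      ?_, by simpa using hpm⟩
    intro hc
    exact hne (by omega)

-- A's whole loop equals B's whole loop (both written without their outer dead code / guard)
set_option maxHeartbeats 1000000 in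
theorem pv_main (fronts : List (List (List Int))) :
    (PySem.List.enumerate fronts).foldl
      (fun acc ip =>
        if (ip.2.foldl
            (fun u ind => if !PySem.Set.contains
              ((PySem.List.enumerate fronts).foldl
                (fun s jp => if ip.1 ≠ jp.1 then PySem.Set.update s jp.2 else s)
                PySem.Set.empty) ind then u ++ [ind] else u)
            []) ≠ []
        then acc ++ [ip.2.foldl
            (fun u ind => if !PySem.Set.contains
              ((PySem.List.enumerate fronts).foldl
                (fun s jp => if ip.1 ≠ jp.1 then PySem.Set.update s jp.2 else s)
                PySem.Set.empty) ind then u ++ [ind] else u)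
            []]
        else acc)
      []
    = fronts.foldl
        (fun acc pf =>
          if (pf.filter (fun ind => !PySem.Set.contains
              (fronts.foldl
                (fun p pf =>
                  (PySem.Set.ofList pf).foldl
                    (fun q t =>
                      if PySem.Set.contains q.1 t then (q.1, PySem.Set.add q.2 t)
                      else (PySem.Set.add q.1 t, q.2)) p)
                (PySem.Set.empty, PySem.Set.empty)).2 ind)) ≠ []
          then acc ++ [pf.filter (fun ind => !PySem.Set.contains
              (fronts.foldl
                (fun p pf =>
                  (PySem.Set.ofList pf).foldl
                    (fun q t =>
                      if PySem.Set.contains q.1 t then (q.1, PySem.Set.add q.2 t)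
                      else (PySem.Set.add q.1 t, q.2)) p)
                (PySem.Set.empty, PySem.Set.empty)).2 ind)]
          else acc)
        [] := by
  refine Eq.trans (PySem.List.foldl_congr_mem _ _ _ _ ?_) (pv_foldl_enumerate _ fronts 0 [])
  intro acc ip hip
  obtain ⟨k, hk, rfl⟩ := (PySem.List.mem_enumerate_iff fronts 0 ip).mp hip
  dsimp only
  rw [PySem.List.foldl_append_if]
  have hq : (fronts[k]'hk).filter
      (fun ind => !PySem.Set.contains
        ((PySem.List.enumerate fronts).foldl
          (fun s jp => if (0 + (k : Int)) ≠ jp.1 then PySem.Set.update s jp.2 else s)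
          PySem.Set.empty) ind)
      = (fronts[k]'hk).filter
        (fun ind => !PySem.Set.contains
          (fronts.foldl
            (fun p pf =>
              (PySem.Set.ofList pf).foldl
                (fun q t =>
                  if PySem.Set.contains q.1 t then (q.1, PySem.Set.add q.2 t)
                  else (PySem.Set.add q.1 t, q.2)) p)
            (PySem.Set.empty, PySem.Set.empty)).2 ind) := by
    apply List.filter_congr
    intro ind hind
    have hiff := pv_keep_iff fronts k hk ind hind
    have hcc : PySem.Set.contains
        ((PySem.List.enumerate fronts).foldl
          (fun s jp => if (0 + (k : Int)) ≠ jp.1 then PySem.Set.update s jp.2 else s)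
          PySem.Set.empty) ind
        = PySem.Set.contains
          (fronts.foldl
            (fun p pf =>
              (PySem.Set.ofList pf).foldl
                (fun q t =>
                  if PySem.Set.contains q.1 t then (q.1, PySem.Set.add q.2 t)
                  else (PySem.Set.add q.1 t, q.2)) p)
            (PySem.Set.empty, PySem.Set.empty)).2 ind := by
      by_cases h : ind ∈ (fronts.foldl
            (fun p pf =>
              (PySem.Set.ofList pf).foldl
                (fun q t =>
                  if PySem.Set.contains q.1 t then (q.1, PySem.Set.add q.2 t)
                  else (PySem.Set.add q.1 t, q.2)) p)
            (PySem.Set.empty, PySem.Set.empty)).2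
      · rw [(PySem.Set.contains_iff _ _).mpr h, (PySem.Set.contains_iff _ _).mpr (hiff.mpr h)]
      · have h1 : PySem.Set.contains (fronts.foldl
            (fun p pf =>
              (PySem.Set.ofList pf).foldl
                (fun q t =>
                  if PySem.Set.contains q.1 t then (q.1, PySem.Set.add q.2 t)
                  else (PySem.Set.add q.1 t, q.2)) p)
            (PySem.Set.empty, PySem.Set.empty)).2 ind = false := by
          rw [Bool.eq_false_iff]
          intro hc; exact h ((PySem.Set.contains_iff _ _).mp hc)
        have h2 : PySem.Set.contains ((PySem.List.enumerate fronts).foldl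
            (fun s jp => if (0 + (k : Int)) ≠ jp.1 then PySem.Set.update s jp.2 else s)
            PySem.Set.empty) ind = false := by
          rw [Bool.eq_false_iff]
          intro hc; exact h (hiff.mp ((PySem.Set.contains_iff _ _).mp hc))
        rw [h1, h2]
    exact congrArg (fun b => !b) hcc
  rw [hq]
  simp only [List.nil_append, List.map_id']

-- ===== VERDICT (by name: the statement is the Claim_ definition above) =====
theorem remove_duplicates_across_pareto_fronts_spec : Claim_equal_remove_duplicates_across_pareto_fronts := by
  intro fronts _
  unfold Spec_remove_duplicates_across_pareto_fronts
  unfold remove_duplicates_across_pareto_fronts remove_duplicates_across_pareto_fronts_alt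
  by_cases hnil : fronts = []
  · subst hnil; simp
  · rw [if_neg hnil]
    exact pv_main fronts
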